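-- pv_equiv track=rewrite | github.com/eemlnu/proyecto-tt | Algoritmo ECLAT.py | recursivity
-- ===== SOURCE A (Python) =====
-- import itertools
--
-- def recursivity(num,data):
--     result = []
--     count = 0
--     for pair in itertools.permutations(data, r=2):
--         result.append(pair)
--         count+=1
--         if(count == 110):
--             break
--     return(result)
-- ===== SOURCE B (Python) =====
-- def recursivity(num, data):
--     # Closed form: the k-th 2-permutation is computed directly by index
--     # arithmetic (divmod), no enumeration of the permutation stream.
--     seq = list(data)
--     n = len(seq)
--     total = min(110, n * (n - 1))
--     result = []
--     for k in range(total):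
--         i, r = divmod(k, n - 1)
--         j = r if r < i else r + 1
--         result.append((seq[i], seq[j]))
--     return result
-- ===== Notes on version B (the rewrite author's own statement) =====
-- stated objective: alternative
-- what changed: Replaces enumeration of itertools.permutations with a closed-form index computation: the k-th pair for k in range(min(110, n*(n-1))) is obtained directly by divmod(k, n-1), with no permutation stream, no skip test and no break counter.
import Mathlib
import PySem

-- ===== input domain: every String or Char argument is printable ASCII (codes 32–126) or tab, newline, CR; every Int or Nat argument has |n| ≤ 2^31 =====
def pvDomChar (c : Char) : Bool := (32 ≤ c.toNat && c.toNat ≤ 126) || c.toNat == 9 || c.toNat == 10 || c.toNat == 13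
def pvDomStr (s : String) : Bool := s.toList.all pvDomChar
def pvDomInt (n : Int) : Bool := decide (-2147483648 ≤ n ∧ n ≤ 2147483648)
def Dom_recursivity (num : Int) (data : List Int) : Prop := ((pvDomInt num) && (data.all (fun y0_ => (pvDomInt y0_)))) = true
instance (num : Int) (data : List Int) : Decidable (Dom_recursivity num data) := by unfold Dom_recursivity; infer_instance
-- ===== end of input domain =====

-- B replaces A's enumeration of the permutation stream (with a break counter)
-- by a closed-form index computation: the k-th pair, for k < min(110, n*(n-1)),
-- is read off directly via divmod(k, n-1) (alternative decomposition, same output).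

-- ===== PORT A =====
-- itertools.permutations(data, 2) yields 2-tuples; PySem.List.permutations yields
-- length-2 lists, so each yielded list is converted to a pair at the iteration
-- boundary (exact: every yielded list has length 2).
def pvPairsA (data : List Int) : List (Int × Int) :=
  (PySem.List.permutations data 2).map (fun l => (l.getD 0 0, l.getD 1 0))

-- the 'for pair in …: result.append(pair); count += 1; if count == 110: break' loop
def pvLoopA : List (Int × Int) → List (Int × Int) → Nat → List (Int × Int)
  | [], result, _ => result
  | pair :: rest, result, count =>
      let result := result ++ [pair]
      let count := count + 1
      if count = 110 then result else pvLoopA rest result count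

def recursivity (num : Int) (data : List Int) : List (Int × Int) :=
  pvLoopA (pvPairsA data) [] 0

-- ===== PORT B =====
-- 'for k in range(total): i, r = divmod(k, n-1); j = r if r < i else r+1; append'
-- (indices are nonnegative, so Nat division/modulo coincide with Python's divmod here)
def recursivity_alt (num : Int) (data : List Int) : List (Int × Int) :=
  (List.range (min 110 (data.length * (data.length - 1)))).map (fun k =>
    (data.getD (k / (data.length - 1)) 0,
     data.getD (if k % (data.length - 1) < k / (data.length - 1)
                then k % (data.length - 1) else k % (data.length - 1) + 1) 0))

-- ===== PRECONDITION & SPEC =====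
def Spec_recursivity (num : Int) (data : List Int) (out : List (Int × Int)) : Prop := out = recursivity_alt num data
instance (num : Int) (data : List Int) (out : List (Int × Int)) : Decidable (Spec_recursivity num data out) := by unfold Spec_recursivity; infer_instance

-- ===== CLAIM (what is proved, stated in full; the proofs are below) =====
def Claim_equal_recursivity : Prop := ∀ (num : Int) (data : List Int), Dom_recursivity num data → Spec_recursivity num data (recursivity num data)

-- ===== LEMMAS AND PROOFS =====
-- the common pair stream in indexed form
def pvRow (xs : List Int) (i : Nat) : List (Int × Int) :=
  ((List.range xs.length).filter (fun j => j ≠ i)).map (fun j => (xs.getD i 0, xs.getD j 0))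

def pvStream (xs : List Int) : List (Int × Int) :=
  (List.range xs.length).flatMap (pvRow xs)

theorem pvLoopA_eq (l : List (Int × Int)) : ∀ (res : List (Int × Int)) (c : Nat), c < 110 →
    pvLoopA l res c = res ++ l.take (110 - c) := by
  induction l with
  | nil => intro res c _; simp [pvLoopA]
  | cons p ps ih =>
      intro res c hc
      simp only [pvLoopA]
      by_cases h : c + 1 = 110
      · have h1 : 110 - c = 1 := by omega
        simp [h, h1]
      · rw [if_neg h, ih _ (c+1) (by omega)]
        have h1 : 110 - c = (110 - (c+1)) + 1 := by omega
        simp [h1]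

theorem pvPermSucc (xs : List Int) (r : Nat) : PySem.List.permutations xs (r+1) =
    (List.range xs.length).flatMap (fun i =>
      match xs[i]? with
      | none => []
      | some a => List.map (fun p => a :: p) (PySem.List.permutations (xs.eraseIdx i) r)) := by
  rw [PySem.List.permutations]
  congr 1
  funext i
  cases h : xs[i]? <;> simp

theorem pvEnumSingles (ys : List Int) :
    (List.range ys.length).flatMap (fun j =>
        match ys[j]? with
        | none => []
        | some b => [[b]])
      = ys.map (fun b => [b]) := by
  induction ys with
  | nil => simp
  | cons y ys ih =>
      simp only [List.length_cons, List.range_succ_eq_map, List.flatMap_cons,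
        List.getElem?_cons_zero, List.flatMap_map]
      rw [List.flatMap_congr (g := fun j =>
          match ys[j]? with
          | none => ([] : List (List Int))
          | some b => [[b]]) (fun a _ => by
        simp only [List.getElem?_cons_succ])]
      rw [ih]
      rfl

theorem pvPermOne (ys : List Int) :
    PySem.List.permutations ys 1 = ys.map (fun b => [b]) := by
  rw [pvPermSucc]
  rw [List.flatMap_congr (g := fun j =>
      match ys[j]? with
      | none => ([] : List (List Int))
      | some b => [[b]]) (fun i _ => by
    cases h : ys[i]? with
    | none => simp [h]
    | some b => simp [h, PySem.List.permutations])]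
  exact pvEnumSingles ys

theorem pvMapRangeGetD (ys : List Int) :
    (List.range ys.length).map (fun j => ys.getD j 0) = ys := by
  induction ys with
  | nil => simp
  | cons y ys ih =>
      simp only [List.length_cons, List.range_succ_eq_map, List.map_cons, List.map_map]
      refine congrArg (y :: ·) ?_
      rw [List.map_congr_left (g := fun j => ys.getD j 0) (fun a _ => by simp)]
      exact ih

theorem pvFilterRange_eraseIdx (xs : List Int) : ∀ (i : Nat), i < xs.length →
    ((List.range xs.length).filter (fun j => j ≠ i)).map (fun j => xs.getD j 0)
      = xs.eraseIdx i := by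
  induction xs with
  | nil => intro i h; simp at h
  | cons x xs ih =>
      intro i hi
      cases i with
      | zero =>
          simp only [List.length_cons, List.range_succ_eq_map, List.eraseIdx_zero,
            List.tail_cons, List.filter_cons, List.filter_map]
          norm_num
          rw [List.filter_congr (q := fun _ => true) (fun a _ => by simp), List.filter_true]
          rw [List.map_congr_left (g := fun j => xs.getD j 0) (fun a _ => by simp)]
          exact pvMapRangeGetD xs
      | succ i' =>
          simp only [List.length_cons, List.range_succ_eq_map, List.eraseIdx_cons_succ,
            List.filter_cons, List.filter_map]
          norm_num
          rw [List.filter_congr (q := fun a => decide (a ≠ i')) (fun a _ => by simp),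
            List.map_congr_left (g := fun j => xs.getD j 0) (fun a _ => by simp)]
          exact ih i' (Nat.lt_of_succ_lt_succ hi)

theorem pvPairsA_eq_stream (xs : List Int) : pvPairsA xs = pvStream xs := by
  unfold pvPairsA pvStream
  rw [pvPermSucc, List.map_flatMap]
  apply List.flatMap_congr
  intro i hi
  have hlt : i < xs.length := List.mem_range.1 hi
  have hget : xs[i]? = some (xs.getD i 0) := by
    rw [List.getD_eq_getElem?_getD, List.getElem?_eq_getElem hlt]; rfl
  rw [hget]
  simp only [pvPermOne, List.map_map]
  unfold pvRow
  rw [← pvFilterRange_eraseIdx xs i hlt, List.map_map]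
  apply List.map_congr_left
  intro a _
  simp

theorem pvA_final (num : Int) (data : List Int) :
    recursivity num data = (pvStream data).take 110 := by
  unfold recursivity
  rw [pvLoopA_eq _ [] 0 (by omega), pvPairsA_eq_stream]
  simp

-- each row, written as a map over range (n-1) via the skip-adjusted index
theorem pvRow_closed (xs : List Int) (i : Nat) (hi : i < xs.length) :
    pvRow xs i = (List.range (xs.length - 1)).map
      (fun r => (xs.getD i 0, xs.getD (if r < i then r else r + 1) 0)) := by
  unfold pvRow
  have h1 : xs.length = (i + 1) + (xs.length - 1 - i) := by omega
  have h2 : xs.length - 1 = i + (xs.length - 1 - i) := by omega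
  conv_lhs => rw [h1, List.range_add, List.range_succ]
  conv_rhs => rw [h2, List.range_add]
  rw [List.append_assoc, List.filter_append, List.filter_append, List.map_append,
    List.map_append, List.map_append, List.filter_map]
  have e1 : (List.range i).filter (fun j => decide (j ≠ i)) = List.range i :=
    List.filter_eq_self.mpr (fun a ha => by
      simp [Nat.ne_of_lt (List.mem_range.1 ha)])
  have e2 : List.filter (fun j => decide (j ≠ i)) [i] = [] := by simp
  have e3 : (List.range (xs.length - 1 - i)).filter ((fun j => decide (j ≠ i)) ∘ (i + 1 + ·))
      = List.range (xs.length - 1 - i) :=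
    List.filter_eq_self.mpr (fun a _ => by simp; omega)
  rw [e1, e2, e3]
  simp only [List.map_nil, List.nil_append, List.map_map]
  congr 1
  · exact List.map_congr_left (fun a ha => by
      simp [List.mem_range.1 ha])
  · apply List.map_congr_left
    intro t _
    simp only [Function.comp]
    have hni : ¬ (i + t < i) := by omega
    rw [if_neg hni]
    congr 2
    omega

-- a flatMap of equal-length mapped rows is a single map with divmod indexing
theorem pvFlatMapDivmod {α : Type} (m : Nat) (g : Nat → Nat → α) : ∀ (cnt : Nat),
    (List.range cnt).flatMap (fun i => (List.range m).map (g i))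
      = (List.range (cnt * m)).map (fun k => g (k / m) (k % m)) := by
  intro cnt
  induction cnt with
  | zero => simp
  | succ c ih =>
      rw [List.range_succ, List.flatMap_append, ih]
      have h1 : (c + 1) * m = c * m + m := by ring
      rw [h1, List.range_add, List.map_append]
      congr 1
      simp only [List.flatMap_cons, List.flatMap_nil, List.append_nil, List.map_map]
      apply List.map_congr_left
      intro r hr
      have hrm : r < m := List.mem_range.1 hr
      have hm : 0 < m := by omega
      have hc : c * m + r = r + c * m := by ring
      simp only [Function.comp]
      rw [hc, Nat.add_mul_div_right _ _ hm, Nat.add_mul_mod_self_right,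
        Nat.div_eq_of_lt hrm, Nat.mod_eq_of_lt hrm, Nat.zero_add]

theorem pvStream_closed (xs : List Int) :
    pvStream xs = (List.range (xs.length * (xs.length - 1))).map
      (fun k => (xs.getD (k / (xs.length - 1)) 0,
        xs.getD (if k % (xs.length - 1) < k / (xs.length - 1)
                 then k % (xs.length - 1) else k % (xs.length - 1) + 1) 0)) := by
  unfold pvStream
  rw [List.flatMap_congr (g := fun i => (List.range (xs.length - 1)).map
      (fun r => (xs.getD i 0, xs.getD (if r < i then r else r + 1) 0)))
      (fun i hi => pvRow_closed xs i (List.mem_range.1 hi))]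
  exact pvFlatMapDivmod (xs.length - 1)
    (fun i r => (xs.getD i 0, xs.getD (if r < i then r else r + 1) 0)) xs.length

theorem pvB_final (num : Int) (data : List Int) :
    recursivity_alt num data = (pvStream data).take 110 := by
  unfold recursivity_alt
  rw [pvStream_closed, ← List.map_take, List.take_range]

-- ===== VERDICT (by name: the statement is the Claim_ definition above) =====
theorem recursivity_spec : Claim_equal_recursivity := by
  intro num data _
  unfold Spec_recursivity
  rw [pvA_final, pvB_final]
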